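-- pv_equiv track=rewrite | github.com/Algorithm-study-2044/Jinan | brute-force/19주차-3108-로고.py | find_min_pu_commands
-- ===== SOURCE A (Python) =====
-- class UnionFind:
--     def __init__(self, n):
--         self.parent = list(range(n))
--         self.rank = [1] * n
--
--     def find(self, u):
--         if self.parent[u] != u:
--             self.parent[u] = self.find(self.parent[u])
--         return self.parent[u]
--
--     def union(self, u, v):
--         root_u = self.find(u)
--         root_v = self.find(v)
--
--         if root_u != root_v:
--             if self.rank[root_u] > self.rank[root_v]:
--                 self.parent[root_v] = root_u
--             elif self.rank[root_u] < self.rank[root_v]: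
--                 self.parent[root_u] = root_v
--             else:
--                 self.parent[root_v] = root_u
--                 self.rank[root_u] += 1
--
-- def is_connected(rect1, rect2):
--     x1, y1, x2, y2 = rect1
--     x3, y3, x4, y4 = rect2
--     return not (x2 < x3 or x4 < x1 or y2 < y3 or y4 < y1)
--
-- def is_reachable_from_origin(rect):
--     x1, y1, x2, y2 = rect
--     return (x1 == 0 or x2 == 0) and (y1 <= 0 <= y2) or (y1 == 0 or y2 == 0) and (x1 <= 0 <= x2)
--
-- def find_min_pu_commands(rectangles):
--     N = len(rectangles)
--     uf = UnionFind(N)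
--     reachable_from_origin = False
--
--     for i in range(N):
--         if is_reachable_from_origin(rectangles[i]):
--             reachable_from_origin = True
--
--         for j in range(i + 1, N):
--             if is_connected(rectangles[i], rectangles[j]):
--                 uf.union(i, j)
--
--     roots = set(uf.find(i) for i in range(N))
--     num_components = len(roots)
--
--     if reachable_from_origin:
--         num_components -= 1
--
--     return num_components
-- ===== SOURCE B (Python) =====
-- def is_connected(rect1, rect2):
--     x1, y1, x2, y2 = rect1
--     x3, y3, x4, y4 = rect2
--     return not (x2 < x3 or x4 < x1 or y2 < y3 or y4 < y1)
--
-- def is_reachable_from_origin(rect):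
--     x1, y1, x2, y2 = rect
--     return (x1 == 0 or x2 == 0) and (y1 <= 0 <= y2) or (y1 == 0 or y2 == 0) and (x1 <= 0 <= x2)
--
-- def find_min_pu_commands(rectangles):
--     # Component labelling: keep a flat label per rectangle; when two rectangles
--     # overlap, rewrite every occurrence of one label into the other.
--     n = len(rectangles)
--     labels = list(range(n))
--     for i in range(n):
--         for j in range(i + 1, n):
--             if is_connected(rectangles[i], rectangles[j]):
--                 li, lj = labels[i], labels[j]
--                 if li != lj:
--                     labels = [li if l == lj else l for l in labels]
--     num_components = len(set(labels))
--     if any(is_reachable_from_origin(r) for r in rectangles):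
--         num_components -= 1
--     return num_components
-- ===== Notes on version B (the rewrite author's own statement) =====
-- stated objective: simpler
-- what changed: Replaces the union-find forest (recursive find with path compression, union by rank, then a root-collection pass) with a flat per-rectangle label list that is rewritten wholesale on each merge, counts components as len(set(labels)), and computes origin reachability with any().
import Mathlib
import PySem

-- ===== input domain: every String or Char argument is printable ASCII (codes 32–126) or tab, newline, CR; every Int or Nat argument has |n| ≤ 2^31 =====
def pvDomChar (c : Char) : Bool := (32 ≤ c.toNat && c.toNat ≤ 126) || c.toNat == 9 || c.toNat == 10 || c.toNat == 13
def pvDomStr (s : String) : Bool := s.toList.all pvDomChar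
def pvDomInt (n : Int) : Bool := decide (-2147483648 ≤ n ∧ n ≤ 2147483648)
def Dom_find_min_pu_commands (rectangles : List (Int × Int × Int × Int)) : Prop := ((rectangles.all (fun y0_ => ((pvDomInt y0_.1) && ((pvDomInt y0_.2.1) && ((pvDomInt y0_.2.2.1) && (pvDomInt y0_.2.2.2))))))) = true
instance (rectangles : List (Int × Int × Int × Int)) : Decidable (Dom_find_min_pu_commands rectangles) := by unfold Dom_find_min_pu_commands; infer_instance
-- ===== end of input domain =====

-- B replaces A's union-find forest (recursive find with path compression, union by
-- rank, root-collection pass) by a flat component-label list rewritten on each merge;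
-- objective: simpler.

-- ===== PORT A =====
def pvConnectedA (r1 r2 : Int × Int × Int × Int) : Bool :=
  !(decide (r1.2.2.1 < r2.1) || decide (r2.2.2.1 < r1.1) ||
    decide (r1.2.2.2 < r2.2.1) || decide (r2.2.2.2 < r1.2.1))

def pvOriginA (r : Int × Int × Int × Int) : Bool :=
  ((r.1 == 0 || r.2.2.1 == 0) && (decide (r.2.1 ≤ 0) && decide ((0:Int) ≤ r.2.2.2))) ||
  ((r.2.1 == 0 || r.2.2.2 == 0) && (decide (r.1 ≤ 0) && decide ((0:Int) ≤ r.2.2.1)))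

-- parent[u]; exact for the in-range indices this program reads (the default is never reached)
def ufGet (p : List Int) (u : Int) : Int := PySem.List.pyGetD p u u

-- UnionFind.find with path compression; fuel is a totality guard only
-- (fuel = len(parent) always suffices: proved by the lemmas below)
def ufFind : Nat → List Int → Int → List Int × Int
  | 0, p, u => (p, u)
  | fuel+1, p, u =>
    let pu := ufGet p u
    if pu = u then (p, u)
    else
      let res := ufFind fuel p pu
      (PySem.List.pySetD res.1 u res.2, res.2)

def ufUnion (fuel : Nat) (p rank : List Int) (u v : Int) : List Int × List Int :=
  let fu := ufFind fuel p u
  let fv := ufFind fuel fu.1 v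
  if fu.2 ≠ fv.2 then
    let ru := PySem.List.pyGetD rank fu.2 0
    let rv := PySem.List.pyGetD rank fv.2 0
    if ru > rv then (PySem.List.pySetD fv.1 fv.2 fu.2, rank)
    else if ru < rv then (PySem.List.pySetD fv.1 fu.2 fv.2, rank)
    else (PySem.List.pySetD fv.1 fv.2 fu.2, PySem.List.pySetD rank fu.2 (ru + 1))
  else (fv.1, rank)

def find_min_pu_commands (rectangles : List (Int × Int × Int × Int)) : Int :=
  let N : Int := PySem.List.len rectangles
  let fuel := rectangles.length
  let st := (PySem.List.pyRange 0 N 1).foldl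
    (fun (st : (List Int × List Int) × Bool) i =>
      ((PySem.List.pyRange (i+1) N 1).foldl
        (fun (uf : List Int × List Int) j =>
          if pvConnectedA (PySem.List.pyGetD rectangles i (0,0,0,0))
                          (PySem.List.pyGetD rectangles j (0,0,0,0))
          then ufUnion fuel uf.1 uf.2 i j else uf)
        st.1,
       if pvOriginA (PySem.List.pyGetD rectangles i (0,0,0,0)) then true else st.2))
    ((PySem.List.pyRange 0 N 1, List.replicate fuel 1), false)
  let roots := (PySem.List.pyRange 0 N 1).foldl
    (fun (acc : List Int × PySem.Set Int) i =>
      let f := ufFind fuel acc.1 i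
      (f.1, PySem.Set.add acc.2 f.2))
    (st.1.1, PySem.Set.empty)
  let num : Int := PySem.List.len roots.2
  if st.2 then num - 1 else num

-- ===== PORT B =====
def pvConnectedB (r1 r2 : Int × Int × Int × Int) : Bool :=
  !(decide (r1.2.2.1 < r2.1) || decide (r2.2.2.1 < r1.1) ||
    decide (r1.2.2.2 < r2.2.1) || decide (r2.2.2.2 < r1.2.1))

def pvOriginB (r : Int × Int × Int × Int) : Bool :=
  ((r.1 == 0 || r.2.2.1 == 0) && (decide (r.2.1 ≤ 0) && decide ((0:Int) ≤ r.2.2.2))) ||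
  ((r.2.1 == 0 || r.2.2.2 == 0) && (decide (r.1 ≤ 0) && decide ((0:Int) ≤ r.2.2.1)))

def find_min_pu_commands_alt (rectangles : List (Int × Int × Int × Int)) : Int :=
  let n : Int := PySem.List.len rectangles
  let labels := (PySem.List.pyRange 0 n 1).foldl
    (fun lab i =>
      (PySem.List.pyRange (i+1) n 1).foldl
        (fun (lab : List Int) j =>
          if pvConnectedB (PySem.List.pyGetD rectangles i (0,0,0,0))
                          (PySem.List.pyGetD rectangles j (0,0,0,0))
          then
            let li := PySem.List.pyGetD lab i 0
            let lj := PySem.List.pyGetD lab j 0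
            if li ≠ lj then lab.map (fun l => if l = lj then li else l) else lab
          else lab)
        lab)
    (PySem.List.pyRange 0 n 1)
  let num : Int := PySem.List.len (PySem.Set.ofList labels)
  if rectangles.any pvOriginB then num - 1 else num

-- ===== PRECONDITION & SPEC =====
def Spec_find_min_pu_commands (rectangles : List (Int × Int × Int × Int)) (out : Int) : Prop := out = find_min_pu_commands_alt rectangles
instance (rectangles : List (Int × Int × Int × Int)) (out : Int) : Decidable (Spec_find_min_pu_commands rectangles out) := by unfold Spec_find_min_pu_commands; infer_instance

-- ===== CLAIM (what is proved, stated in full; the proofs are below) =====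
def Claim_equal_find_min_pu_commands : Prop := ∀ (rectangles : List (Int × Int × Int × Int)), Dom_find_min_pu_commands rectangles → Spec_find_min_pu_commands rectangles (find_min_pu_commands rectangles)

-- ===== LEMMAS AND PROOFS =====

-- root of u in the parent forest, computed with explicit fuel
def chainRoot : Nat → List Int → Int → Int
  | 0, _, u => u
  | f+1, p, u => if ufGet p u = u then u else chainRoot f p (ufGet p u)

-- the parent list is a forest on [0,n): in-range pointers that strictly decrease d
def Dec (n : Nat) (p : List Int) (d : Int → Nat) : Prop :=
  ∀ u : Int, 0 ≤ u → u < (n:Int) →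
    0 ≤ ufGet p u ∧ ufGet p u < (n:Int) ∧ (ufGet p u ≠ u → d (ufGet p u) < d u)

-- size of u's component
def sz (n : Nat) (p : List Int) (u : Int) : Nat :=
  (PySem.List.pyRange 0 (n:Int) 1).countP (fun w => chainRoot n p w == chainRoot n p u)

-- full union-find invariant: forest whose depth measure is below the component size
def UFd (n : Nat) (p : List Int) (d : Int → Nat) : Prop :=
  Dec n p d ∧ ∀ u : Int, 0 ≤ u → u < (n:Int) → d u < sz n p u

-- q is p with some non-root nodes repointed at their p-root (path compression)
def Compressed (n : Nat) (p q : List Int) : Prop :=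
  q.length = p.length ∧ ∀ w : Int, 0 ≤ w → w < (n:Int) →
    (ufGet q w = ufGet p w ∨ (ufGet p w ≠ w ∧ ufGet q w = chainRoot n p w))

-- kernels agree: same-root in the forest iff same label
def Ker (n : Nat) (p lab : List Int) : Prop :=
  ∀ u v : Int, 0 ≤ u → u < (n:Int) → 0 ≤ v → v < (n:Int) →
    (chainRoot n p u = chainRoot n p v ↔ PySem.List.pyGetD lab u 0 = PySem.List.pyGetD lab v 0)

theorem chainRoot_of_root (f : Nat) (p : List Int) (u : Int) (h : ufGet p u = u) :
    chainRoot f p u = u := by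
  cases f <;> simp [chainRoot, h]

theorem sz_le (n : Nat) (p : List Int) (u : Int) : sz n p u ≤ n := by
  have h := List.countP_le_length (l := PySem.List.pyRange 0 (n:Int) 1)
    (p := fun w => chainRoot n p w == chainRoot n p u)
  simpa [sz, PySem.List.length_pyRange_one] using h

theorem chain_spec (n : Nat) (p : List Int) (d : Int → Nat) (hd : Dec n p d) :
    ∀ (f : Nat) (u : Int), 0 ≤ u → u < (n:Int) → d u < f →
      ufGet p (chainRoot f p u) = chainRoot f p u ∧
      0 ≤ chainRoot f p u ∧ chainRoot f p u < (n:Int) ∧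
      d (chainRoot f p u) ≤ d u ∧
      (∀ f', d u < f' → chainRoot f' p u = chainRoot f p u) := by
  intro f
  induction f with
  | zero => intro u _ _ h; omega
  | succ f ih =>
    intro u hu0 hun hf
    by_cases h : ufGet p u = u
    · rw [chainRoot_of_root _ _ _ h]
      exact ⟨h, hu0, hun, le_refl _, fun f' _ => chainRoot_of_root _ _ _ h⟩
    · obtain ⟨h1, h2, h3⟩ := hd u hu0 hun
      have hdu : d (ufGet p u) < d u := h3 h
      have hstep : chainRoot (f+1) p u = chainRoot f p (ufGet p u) := by
        simp [chainRoot, h]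
      obtain ⟨i1, i2, i3, i4, i5⟩ := ih (ufGet p u) h1 h2 (by omega)
      refine ⟨by rw [hstep]; exact i1, by rw [hstep]; exact i2, by rw [hstep]; exact i3,
        by rw [hstep]; omega, ?_⟩
      intro f' hf'
      match f' with
      | 0 => omega
      | f'+1 =>
        have : chainRoot (f'+1) p u = chainRoot f' p (ufGet p u) := by
          simp [chainRoot, h]
        rw [this, hstep, i5 f' (by omega)]

theorem root_step (n : Nat) (p : List Int) (d : Int → Nat) (hd : Dec n p d)
    (u : Int) (hu0 : 0 ≤ u) (hun : u < (n:Int)) (hne : ufGet p u ≠ u) (hdn : d u < n) :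
    chainRoot n p u = chainRoot n p (ufGet p u) := by
  obtain ⟨h1, h2, h3⟩ := hd u hu0 hun
  have hdu := h3 hne
  obtain ⟨_, _, _, _, i5⟩ := chain_spec n p d hd n u hu0 hun hdn
  obtain ⟨_, _, _, _, j5⟩ := chain_spec n p d hd n (ufGet p u) h1 h2 (by omega)
  have e1 : chainRoot (d u + 1) p u = chainRoot (d u) p (ufGet p u) := by
    simp [chainRoot, hne]
  rw [← i5 (d u + 1) (by omega), e1, j5 (d u) (by omega)]

theorem compressed_root (n : Nat) (p q : List Int) (d : Int → Nat) (hd : Dec n p d)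
    (hdn : ∀ u : Int, 0 ≤ u → u < (n:Int) → d u < n) (hc : Compressed n p q) :
    ∀ (f : Nat) (u : Int), 0 ≤ u → u < (n:Int) → d u < f →
      chainRoot f q u = chainRoot n p u := by
  intro f
  induction f with
  | zero => intro u _ _ h; omega
  | succ f ih =>
    intro u hu0 hun hf
    rcases hc.2 u hu0 hun with hq | ⟨hne, hq⟩
    · by_cases h : ufGet p u = u
      · rw [chainRoot_of_root _ q u (by rw [hq]; exact h), chainRoot_of_root _ p u h]
      · obtain ⟨h1, h2, h3⟩ := hd u hu0 hun
        have hdu := h3 h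
        have : chainRoot (f+1) q u = chainRoot f q (ufGet p u) := by
          simp [chainRoot, hq, h]
        rw [this, ih (ufGet p u) h1 h2 (by omega),
          ← root_step n p d hd u hu0 hun h (hdn u hu0 hun)]
    · -- ufGet q u is u's p-root
      obtain ⟨r1, r2, r3, _, _⟩ := chain_spec n p d hd n u hu0 hun (hdn u hu0 hun)
      by_cases h : chainRoot n p u = u
      · rw [chainRoot_of_root _ q u (by rw [hq]; exact h), h]
      · have hqroot : ufGet q (chainRoot n p u) = chainRoot n p u := by
          rcases hc.2 _ r2 r3 with e | ⟨hne', _⟩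
          · rw [e]; exact r1
          · exact absurd r1 hne'
        have : chainRoot (f+1) q u = chainRoot f q (chainRoot n p u) := by
          simp [chainRoot, hq, h]
        rw [this, chainRoot_of_root _ q _ hqroot]

theorem ufd_dlt (n : Nat) (p : List Int) (d : Int → Nat) (h : UFd n p d) :
    ∀ u : Int, 0 ≤ u → u < (n:Int) → d u < n := by
  intro u h0 h1
  have := h.2 u h0 h1
  have := sz_le n p u
  omega

theorem compressed_chain (n : Nat) (p q : List Int) (d : Int → Nat) (h : UFd n p d)
    (hc : Compressed n p q) (u : Int) (hu0 : 0 ≤ u) (hun : u < (n:Int)) :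
    chainRoot n q u = chainRoot n p u :=
  compressed_root n p q d h.1 (ufd_dlt n p d h) hc n u hu0 hun (ufd_dlt n p d h u hu0 hun)

theorem compressed_ufd (n : Nat) (p q : List Int) (d : Int → Nat) (h : UFd n p d)
    (hc : Compressed n p q) : UFd n q d := by
  have hdn := ufd_dlt n p d h
  have hdec : Dec n q d := by
    intro u hu0 hun
    rcases hc.2 u hu0 hun with hq | ⟨hne, hq⟩
    · rw [hq]; exact h.1 u hu0 hun
    · obtain ⟨r1, r2, r3, _, _⟩ := chain_spec n p d h.1 n u hu0 hun (hdn u hu0 hun)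
      refine ⟨by rw [hq]; exact r2, by rw [hq]; exact r3, ?_⟩
      intro hne'
      obtain ⟨h1, h2, h3⟩ := h.1 u hu0 hun
      have hdu := h3 hne
      obtain ⟨_, _, _, j4, _⟩ := chain_spec n p d h.1 n (ufGet p u) h1 h2 (by have := hdn _ h1 h2; omega)
      rw [hq, root_step n p d h.1 u hu0 hun hne (hdn u hu0 hun)]
      omega
  refine ⟨hdec, ?_⟩
  intro u hu0 hun
  have hsz : sz n q u = sz n p u := by
    apply List.countP_congr
    intro w hw
    obtain ⟨hw0, hwn⟩ := PySem.List.mem_pyRange_one.mp hw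
    simp only [compressed_chain n p q d h hc w hw0 hwn,
      compressed_chain n p q d h hc u hu0 hun]
  rw [hsz]; exact h.2 u hu0 hun

theorem ufGet_pySetD (p : List Int) (i v w : Int) (hi0 : 0 ≤ i) (_hin : i < (p.length:Int))
    (hw0 : 0 ≤ w) (hwn : w < (p.length:Int)) :
    ufGet (PySem.List.pySetD p i v) w = if w = i then v else ufGet p w := by
  rw [ufGet, ufGet, PySem.List.pySetD_of_nonneg p v hi0]
  rw [PySem.List.pyGetD_eq_getElem _ _ hw0 (by simpa using hwn),
      PySem.List.pyGetD_eq_getElem _ _ hw0 hwn]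
  rw [List.getElem_set]
  by_cases h : w = i
  · simp [h]
  · have : i.toNat ≠ w.toNat := by omega
    simp [h, this]

theorem find_spec (n : Nat) (p : List Int) (d : Int → Nat) (h : UFd n p d)
    (hn : p.length = n) :
    ∀ (f : Nat) (u : Int), 0 ≤ u → u < (n:Int) → d u < f →
      (ufFind f p u).2 = chainRoot n p u ∧ Compressed n p (ufFind f p u).1 := by
  intro f
  induction f with
  | zero => intro u _ _ hf; omega
  | succ f ih =>
    intro u hu0 hun hf
    by_cases hr : ufGet p u = u
    · have : ufFind (f+1) p u = (p, u) := by simp [ufFind, hr]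
      rw [this, chainRoot_of_root _ _ _ hr]
      exact ⟨rfl, rfl, fun w _ _ => Or.inl rfl⟩
    · obtain ⟨h1, h2, h3⟩ := h.1 u hu0 hun
      have hdu := h3 hr
      obtain ⟨ir, ic⟩ := ih (ufGet p u) h1 h2 (by omega)
      have hstep : ufFind (f+1) p u =
          (PySem.List.pySetD (ufFind f p (ufGet p u)).1 u (ufFind f p (ufGet p u)).2,
           (ufFind f p (ufGet p u)).2) := by
        simp [ufFind, hr]
      have hroot : (ufFind f p (ufGet p u)).2 = chainRoot n p u := by
        rw [ir, ← root_step n p d h.1 u hu0 hun hr (ufd_dlt n p d h u hu0 hun)]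
      rw [hstep]
      refine ⟨hroot, ?_, ?_⟩
      · rw [PySem.List.length_pySetD, ic.1]
      · intro w hw0 hwn
        by_cases hwu : w = u
        · right
          subst hwu
          constructor
          · exact hr
          · rw [ufGet_pySetD _ _ _ _ hu0 (by rw [ic.1, hn]; exact hun) hw0
              (by rw [ic.1, hn]; exact hwn)]
            simp [hroot]
        · rw [ufGet_pySetD _ _ _ _ hu0 (by rw [ic.1, hn]; exact hun) hw0
            (by rw [ic.1, hn]; exact hwn)]
          simp only [hwu, if_false]
          exact ic.2 w hw0 hwn

theorem countP_or_disjoint (l : List Int) (f g : Int → Bool)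
    (h : ∀ x ∈ l, ¬(f x = true ∧ g x = true)) :
    l.countP (fun x => f x || g x) = l.countP f + l.countP g := by
  induction l with
  | nil => simp
  | cons x xs ih =>
    have hx := h x (by simp)
    have ih' := ih (fun y hy => h y (by simp [hy]))
    by_cases hf : f x
    · have hg : g x = false := by
        cases hgx : g x
        · rfl
        · exact absurd ⟨hf, hgx⟩ hx
      simp [hf, hg, ih']
      omega
    · simp only [Bool.not_eq_true] at hf
      cases hg : g x <;> simp [hf, hg, ih'] <;> omega

-- linking root a under root b merges exactly the two components
theorem link_spec (n : Nat) (p : List Int) (d : Int → Nat) (h : UFd n p d)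
    (hn : p.length = n) (a b : Int) (ha0 : 0 ≤ a) (han : a < (n:Int))
    (hb0 : 0 ≤ b) (hbn : b < (n:Int)) (hab : a ≠ b)
    (hra : ufGet p a = a) (hrb : ufGet p b = b) :
    (∀ w : Int, 0 ≤ w → w < (n:Int) →
      chainRoot n (PySem.List.pySetD p a b) w =
        (if chainRoot n p w = a then b else chainRoot n p w)) ∧
    (∃ d', UFd n (PySem.List.pySetD p a b) d') := by
  have hdn := ufd_dlt n p d h
  have hlen : (PySem.List.pySetD p a b).length = p.length := PySem.List.length_pySetD _ _ _
  have hget : ∀ w : Int, 0 ≤ w → w < (n:Int) →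
      ufGet (PySem.List.pySetD p a b) w = if w = a then b else ufGet p w := by
    intro w hw0 hwn
    exact ufGet_pySetD p a b w ha0 (by rw [hn]; exact han) hw0 (by rw [hn]; exact hwn)
  have key : ∀ (f : Nat) (w : Int), 0 ≤ w → w < (n:Int) → d w < f →
      chainRoot f (PySem.List.pySetD p a b) w =
        (if chainRoot n p w = a then b else chainRoot n p w) := by
    intro f
    induction f with
    | zero => intro w _ _ hf; omega
    | succ f ih =>
      intro w hw0 hwn hf
      by_cases hwa : w = a
      · have e1 : ufGet (PySem.List.pySetD p a b) a = b := by rw [hget a ha0 han]; simp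
        have e2 : ufGet (PySem.List.pySetD p a b) b = b := by
          rw [hget b hb0 hbn]; simp [Ne.symm hab, hrb]
        have estep : chainRoot (f+1) (PySem.List.pySetD p a b) a =
            chainRoot f (PySem.List.pySetD p a b) b := by
          simp [chainRoot, e1, Ne.symm hab]
        rw [hwa, estep, chainRoot_of_root _ _ _ e2, chainRoot_of_root _ _ _ hra]
        simp
      · have e1 : ufGet (PySem.List.pySetD p a b) w = ufGet p w := by
          rw [hget w hw0 hwn]; simp [hwa]
        by_cases hr : ufGet p w = w
        · rw [chainRoot_of_root _ _ _ (by rw [e1]; exact hr),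
            chainRoot_of_root _ _ _ hr]
          simp [hwa]
        · obtain ⟨h1, h2, h3⟩ := h.1 w hw0 hwn
          have hdw := h3 hr
          have : chainRoot (f+1) (PySem.List.pySetD p a b) w =
              chainRoot f (PySem.List.pySetD p a b) (ufGet p w) := by
            simp [chainRoot, e1, hr]
          rw [this, ih (ufGet p w) h1 h2 (by omega),
            ← root_step n p d h.1 w hw0 hwn hr (hdn w hw0 hwn)]
  have keyn : ∀ w : Int, 0 ≤ w → w < (n:Int) →
      chainRoot n (PySem.List.pySetD p a b) w =
        (if chainRoot n p w = a then b else chainRoot n p w) := by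
    intro w hw0 hwn; exact key n w hw0 hwn (hdn w hw0 hwn)
  refine ⟨keyn, ?_⟩
  refine ⟨fun w => if chainRoot n p w = a then d w + d b + 1 else d w, ?_, ?_⟩
  · -- Dec
    intro u hu0 hun
    by_cases hua : u = a
    · have e : ufGet (PySem.List.pySetD p a b) u = b := by
        rw [hget u hu0 hun, hua]; simp
      rw [e]
      refine ⟨hb0, hbn, ?_⟩
      intro _
      rw [hua]
      beta_reduce
      rw [chainRoot_of_root n _ _ hrb, chainRoot_of_root n _ _ hra]
      rw [if_neg (Ne.symm hab), if_pos rfl]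
      omega
    · rw [hget u hu0 hun, if_neg hua]
      obtain ⟨h1, h2, h3⟩ := h.1 u hu0 hun
      refine ⟨h1, h2, ?_⟩
      intro hne
      have hroot : chainRoot n p (ufGet p u) = chainRoot n p u :=
        (root_step n p d h.1 u hu0 hun hne (hdn u hu0 hun)).symm
      beta_reduce
      rw [hroot]
      have := h3 hne
      by_cases hc : chainRoot n p u = a <;> simp [hc] <;> omega
  · -- bound
    intro u hu0 hun
    have hdb : d b < sz n p b := h.2 b hb0 hbn
    have hdu : d u < sz n p u := h.2 u hu0 hun
    have hrootb : chainRoot n p b = b := chainRoot_of_root _ _ _ hrb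
    by_cases hA : chainRoot n p u = a
    · have hqu : chainRoot n (PySem.List.pySetD p a b) u = b := by
        rw [keyn u hu0 hun, if_pos hA]
      have hsum : sz n (PySem.List.pySetD p a b) u =
          sz n p u + sz n p b := by
        have e1 : sz n (PySem.List.pySetD p a b) u =
            (PySem.List.pyRange 0 (n:Int) 1).countP
              (fun w => chainRoot n p w == a || chainRoot n p w == b) := by
          apply List.countP_congr
          intro w hw
          obtain ⟨hw0, hwn⟩ := PySem.List.mem_pyRange_one.mp hw
          rw [hqu, keyn w hw0 hwn]
          by_cases hwA : chainRoot n p w = a <;> simp [hwA]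
        have e2 : sz n p u =
            (PySem.List.pyRange 0 (n:Int) 1).countP (fun w => chainRoot n p w == a) := by
          apply List.countP_congr
          intro w _
          rw [hA]
        have e3 : sz n p b =
            (PySem.List.pyRange 0 (n:Int) 1).countP (fun w => chainRoot n p w == b) := by
          apply List.countP_congr
          intro w _
          rw [hrootb]
        rw [e1, e2, e3, countP_or_disjoint]
        intro x _ hx
        simp only [beq_iff_eq] at hx
        exact hab (hx.1 ▸ hx.2 ▸ rfl)
      rw [hsum]
      beta_reduce
      rw [if_pos hA]
      omega
    · by_cases hB : chainRoot n p u = b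
      · have hqu : chainRoot n (PySem.List.pySetD p a b) u = b := by
          rw [keyn u hu0 hun, if_neg hA, hB]
        have hsum : sz n (PySem.List.pySetD p a b) u =
            (PySem.List.pyRange 0 (n:Int) 1).countP (fun w => chainRoot n p w == a) +
            (PySem.List.pyRange 0 (n:Int) 1).countP (fun w => chainRoot n p w == b) := by
          have e1 : sz n (PySem.List.pySetD p a b) u =
              (PySem.List.pyRange 0 (n:Int) 1).countP
                (fun w => chainRoot n p w == a || chainRoot n p w == b) := by
            apply List.countP_congr
            intro w hw
            obtain ⟨hw0, hwn⟩ := PySem.List.mem_pyRange_one.mp hw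
            rw [hqu, keyn w hw0 hwn]
            by_cases hwA : chainRoot n p w = a <;> simp [hwA]
          rw [e1, countP_or_disjoint]
          intro x _ hx
          simp only [beq_iff_eq] at hx
          exact hab (hx.1 ▸ hx.2 ▸ rfl)
        have e2 : sz n p u =
            (PySem.List.pyRange 0 (n:Int) 1).countP (fun w => chainRoot n p w == b) := by
          apply List.countP_congr
          intro w _
          rw [hB]
        rw [hsum]
        beta_reduce
        rw [if_neg hA]
        omega
      · have hsz : sz n (PySem.List.pySetD p a b) u = sz n p u := by
          apply List.countP_congr
          intro w hw
          obtain ⟨hw0, hwn⟩ := PySem.List.mem_pyRange_one.mp hw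
          rw [keyn w hw0 hwn, keyn u hu0 hun, if_neg hA]
          by_cases hwA : chainRoot n p w = a
          · simp [hwA, Ne.symm hB, Ne.symm hA]
          · simp [hwA]
        rw [hsz]
        beta_reduce
        rw [if_neg hA]
        omega

theorem compressed_fix (n : Nat) (p q : List Int) (hc : Compressed n p q)
    (r : Int) (hr0 : 0 ≤ r) (hrn : r < (n:Int)) (hr : ufGet p r = r) : ufGet q r = r := by
  rcases hc.2 r hr0 hrn with e | ⟨hne, _⟩
  · rw [e]; exact hr
  · exact absurd hr hne

theorem subst_eq_iff (A B x y : Int) (_hAB : A ≠ B) :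
    ((if x = A then B else x) = (if y = A then B else y)) ↔
      (x = y ∨ (x = A ∧ y = B) ∨ (x = B ∧ y = A)) := by
  split_ifs <;> omega

theorem union_spec (n : Nat) (p rk : List Int) (d : Int → Nat) (i j : Int)
    (h : UFd n p d) (hn : p.length = n)
    (hi0 : 0 ≤ i) (hi1 : i < (n:Int)) (hj0 : 0 ≤ j) (hj1 : j < (n:Int)) :
    (ufUnion n p rk i j).1.length = n ∧
    (∃ d', UFd n (ufUnion n p rk i j).1 d') ∧
    (∀ u v : Int, 0 ≤ u → u < (n:Int) → 0 ≤ v → v < (n:Int) →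
      (chainRoot n (ufUnion n p rk i j).1 u = chainRoot n (ufUnion n p rk i j).1 v ↔
        (chainRoot n p u = chainRoot n p v ∨
         (chainRoot n p u = chainRoot n p i ∧ chainRoot n p v = chainRoot n p j) ∨
         (chainRoot n p u = chainRoot n p j ∧ chainRoot n p v = chainRoot n p i)))) := by
  have hdn := ufd_dlt n p d h
  obtain ⟨f1r, f1c⟩ := find_spec n p d h hn n i hi0 hi1 (hdn i hi0 hi1)
  have h1 : UFd n (ufFind n p i).1 d := compressed_ufd n p _ d h f1c
  have len1 : (ufFind n p i).1.length = n := by rw [f1c.1, hn]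
  have re1 : ∀ w : Int, 0 ≤ w → w < (n:Int) →
      chainRoot n (ufFind n p i).1 w = chainRoot n p w :=
    fun w hw0 hwn => compressed_chain n p _ d h f1c w hw0 hwn
  obtain ⟨f2r, f2c⟩ := find_spec n (ufFind n p i).1 d h1 len1 n j hj0 hj1
    (ufd_dlt n _ d h1 j hj0 hj1)
  have h2 : UFd n (ufFind n (ufFind n p i).1 j).1 d := compressed_ufd n _ _ d h1 f2c
  have len2 : (ufFind n (ufFind n p i).1 j).1.length = n := by rw [f2c.1, len1]
  have re2 : ∀ w : Int, 0 ≤ w → w < (n:Int) →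
      chainRoot n (ufFind n (ufFind n p i).1 j).1 w = chainRoot n p w := by
    intro w hw0 hwn
    rw [compressed_chain n _ _ d h1 f2c w hw0 hwn, re1 w hw0 hwn]
  have hri : (ufFind n p i).2 = chainRoot n p i := f1r
  have hrj : (ufFind n (ufFind n p i).1 j).2 = chainRoot n p j := by
    rw [f2r, re1 j hj0 hj1]
  obtain ⟨riroot, ri0, rin, _, _⟩ := chain_spec n p d h.1 n i hi0 hi1 (hdn i hi0 hi1)
  obtain ⟨rjroot, rj0, rjn, _, _⟩ := chain_spec n p d h.1 n j hj0 hj1 (hdn j hj0 hj1)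
  have riroot2 : ufGet (ufFind n (ufFind n p i).1 j).1 (chainRoot n p i) = chainRoot n p i :=
    compressed_fix n _ _ f2c _ ri0 rin (compressed_fix n _ _ f1c _ ri0 rin riroot)
  have rjroot2 : ufGet (ufFind n (ufFind n p i).1 j).1 (chainRoot n p j) = chainRoot n p j :=
    compressed_fix n _ _ f2c _ rj0 rjn (compressed_fix n _ _ f1c _ rj0 rjn rjroot)
  by_cases hcase : (ufFind n p i).2 ≠ (ufFind n (ufFind n p i).1 j).2
  · -- roots differ: one of three rank branches, each a single link
    have hne : chainRoot n p i ≠ chainRoot n p j := by rw [← hri, ← hrj]; exact hcase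
    have hbranch : ∃ A B : Int,
        ((A = chainRoot n p j ∧ B = chainRoot n p i) ∨
         (A = chainRoot n p i ∧ B = chainRoot n p j)) ∧
        (ufUnion n p rk i j).1 = PySem.List.pySetD (ufFind n (ufFind n p i).1 j).1 A B := by
      rw [ufUnion]
      simp only [if_pos hcase]
      by_cases c1 : PySem.List.pyGetD rk (ufFind n p i).2 0 > PySem.List.pyGetD rk (ufFind n (ufFind n p i).1 j).2 0
      · exact ⟨_, _, Or.inl ⟨hrj, hri⟩, by simp [c1]⟩
      · by_cases c2 : PySem.List.pyGetD rk (ufFind n p i).2 0 < PySem.List.pyGetD rk (ufFind n (ufFind n p i).1 j).2 0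
        · exact ⟨_, _, Or.inr ⟨hri, hrj⟩, by simp [c1, c2]⟩
        · exact ⟨_, _, Or.inl ⟨hrj, hri⟩, by simp [c1, c2]⟩
    obtain ⟨A, B, hABv, hP⟩ := hbranch
    have hA0 : 0 ≤ A := by rcases hABv with ⟨e, _⟩ | ⟨e, _⟩ <;> rw [e] <;> assumption
    have hAn : A < (n:Int) := by rcases hABv with ⟨e, _⟩ | ⟨e, _⟩ <;> rw [e] <;> assumption
    have hB0 : 0 ≤ B := by rcases hABv with ⟨_, e⟩ | ⟨_, e⟩ <;> rw [e] <;> assumption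
    have hBn : B < (n:Int) := by rcases hABv with ⟨_, e⟩ | ⟨_, e⟩ <;> rw [e] <;> assumption
    have hAB : A ≠ B := by
      rcases hABv with ⟨e1, e2⟩ | ⟨e1, e2⟩ <;> rw [e1, e2]
      · exact Ne.symm hne
      · exact hne
    have hAroot : ufGet (ufFind n (ufFind n p i).1 j).1 A = A := by
      rcases hABv with ⟨e, _⟩ | ⟨e, _⟩ <;> rw [e] <;> assumption
    have hBroot : ufGet (ufFind n (ufFind n p i).1 j).1 B = B := by
      rcases hABv with ⟨_, e⟩ | ⟨_, e⟩ <;> rw [e] <;> assumption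
    obtain ⟨keyn, hufd'⟩ := link_spec n _ d h2 len2 A B hA0 hAn hB0 hBn hAB hAroot hBroot
    refine ⟨?_, ?_, ?_⟩
    · rw [hP, PySem.List.length_pySetD, len2]
    · rw [hP]; exact hufd'
    · intro u v hu0 hun hv0 hvn
      have hrootA2 : chainRoot n (ufFind n (ufFind n p i).1 j).1 A = A :=
        chainRoot_of_root _ _ _ hAroot
      rw [hP, keyn u hu0 hun, keyn v hv0 hvn, re2 u hu0 hun, re2 v hv0 hvn]
      rw [subst_eq_iff A B (chainRoot n p u) (chainRoot n p v) hAB]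
      rcases hABv with ⟨e1, e2⟩ | ⟨e1, e2⟩ <;> rw [e1, e2] <;>
        constructor <;> intro hyp <;> rcases hyp with hh | hh | hh <;> tauto
  · -- roots already equal: state is only compressed
    rw [not_not] at hcase
    have heq : chainRoot n p i = chainRoot n p j := by rw [← hri, ← hrj, hcase]
    have hP : (ufUnion n p rk i j).1 = (ufFind n (ufFind n p i).1 j).1 := by
      rw [ufUnion]
      simp [hcase]
    refine ⟨by rw [hP]; exact len2, ⟨d, by rw [hP]; exact h2⟩, ?_⟩
    intro u v hu0 hun hv0 hvn
    rw [hP, re2 u hu0 hun, re2 v hv0 hvn]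
    constructor
    · intro hh; exact Or.inl hh
    · intro hh
      rcases hh with hh | ⟨e1, e2⟩ | ⟨e1, e2⟩
      · exact hh
      · rw [e1, e2, heq]
      · rw [e1, e2, heq]

theorem connAB : pvConnectedA = pvConnectedB := rfl

theorem labGet_map_subst (lab : List Int) (li lj u : Int) (hu0 : 0 ≤ u)
    (hun : u < (lab.length : Int)) :
    PySem.List.pyGetD (lab.map (fun l => if l = lj then li else l)) u 0
      = (if PySem.List.pyGetD lab u 0 = lj then li else PySem.List.pyGetD lab u 0) := by
  rw [PySem.List.pyGetD_eq_getElem _ _ hu0 (by simpa using hun),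
      PySem.List.pyGetD_eq_getElem _ _ hu0 hun, List.getElem_map]

theorem inner_loop (rects : List (Int × Int × Int × Int)) (i : Int)
    (hi0 : 0 ≤ i) (hi1 : i < (rects.length : Int)) :
    ∀ (js : List Int), (∀ j ∈ js, 0 ≤ j ∧ j < (rects.length : Int)) →
    ∀ (uf : List Int × List Int) (lab : List Int),
      (∃ d, UFd rects.length uf.1 d) → uf.1.length = rects.length →
      lab.length = rects.length → Ker rects.length uf.1 lab →
      (∃ d', UFd rects.length
        ((js.foldl (fun (uf : List Int × List Int) j =>
          if pvConnectedA (PySem.List.pyGetD rects i (0,0,0,0))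
                          (PySem.List.pyGetD rects j (0,0,0,0))
          then ufUnion rects.length uf.1 uf.2 i j else uf) uf)).1 d') ∧
      ((js.foldl (fun (uf : List Int × List Int) j =>
          if pvConnectedA (PySem.List.pyGetD rects i (0,0,0,0))
                          (PySem.List.pyGetD rects j (0,0,0,0))
          then ufUnion rects.length uf.1 uf.2 i j else uf) uf)).1.length = rects.length ∧
      (js.foldl (fun (lab : List Int) j =>
          if pvConnectedB (PySem.List.pyGetD rects i (0,0,0,0))
                          (PySem.List.pyGetD rects j (0,0,0,0))
          then
            if PySem.List.pyGetD lab i 0 ≠ PySem.List.pyGetD lab j 0 then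
              lab.map (fun l =>
                if l = PySem.List.pyGetD lab j 0 then PySem.List.pyGetD lab i 0 else l)
            else lab
          else lab) lab).length = rects.length ∧
      Ker rects.length
        ((js.foldl (fun (uf : List Int × List Int) j =>
          if pvConnectedA (PySem.List.pyGetD rects i (0,0,0,0))
                          (PySem.List.pyGetD rects j (0,0,0,0))
          then ufUnion rects.length uf.1 uf.2 i j else uf) uf)).1
        (js.foldl (fun (lab : List Int) j =>
          if pvConnectedB (PySem.List.pyGetD rects i (0,0,0,0))
                          (PySem.List.pyGetD rects j (0,0,0,0))
          then
            if PySem.List.pyGetD lab i 0 ≠ PySem.List.pyGetD lab j 0 then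
              lab.map (fun l =>
                if l = PySem.List.pyGetD lab j 0 then PySem.List.pyGetD lab i 0 else l)
            else lab
          else lab) lab) := by
  intro js
  induction js with
  | nil => intro _ uf lab hufd hlen hlab hker; exact ⟨hufd, hlen, hlab, hker⟩
  | cons j js ih =>
    intro hjs uf lab hufd hlen hlab hker
    obtain ⟨hj0, hj1⟩ := hjs j (by simp)
    have hjs' : ∀ j' ∈ js, 0 ≤ j' ∧ j' < (rects.length : Int) :=
      fun j' hj' => hjs j' (by simp [hj'])
    simp only [List.foldl_cons]
    by_cases hconn : pvConnectedA (PySem.List.pyGetD rects i (0,0,0,0))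
        (PySem.List.pyGetD rects j (0,0,0,0)) = true
    · rw [if_pos hconn, if_pos (by rw [← connAB]; exact hconn)]
      obtain ⟨d, hd⟩ := hufd
      obtain ⟨ulen, ⟨d', hd'⟩, uker⟩ :=
        union_spec rects.length uf.1 uf.2 d i j hd hlen hi0 hi1 hj0 hj1
      by_cases hroots : chainRoot rects.length uf.1 i = chainRoot rects.length uf.1 j
      · -- already same component: labels untouched
        have hlij : PySem.List.pyGetD lab i 0 = PySem.List.pyGetD lab j 0 :=
          (hker i j hi0 hi1 hj0 hj1).mp hroots
        rw [if_neg (by simpa using hlij)]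
        apply ih hjs' _ lab ⟨d', hd'⟩ ulen hlab
        intro u v hu0 hun hv0 hvn
        rw [uker u v hu0 hun hv0 hvn, ← hker u v hu0 hun hv0 hvn]
        constructor
        · rintro (hh | ⟨e1, e2⟩ | ⟨e1, e2⟩)
          · exact hh
          · rw [e1, e2, hroots]
          · rw [e1, e2, hroots]
        · exact Or.inl
      · -- merge: labels lj are rewritten to li
        have hlij : PySem.List.pyGetD lab i 0 ≠ PySem.List.pyGetD lab j 0 :=
          fun e => hroots ((hker i j hi0 hi1 hj0 hj1).mpr e)
        rw [if_pos (by simpa using hlij)]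
        apply ih hjs' _ _ ⟨d', hd'⟩ ulen (by rw [List.length_map]; exact hlab)
        intro u v hu0 hun hv0 hvn
        rw [uker u v hu0 hun hv0 hvn]
        rw [labGet_map_subst lab _ _ u hu0 (by rw [hlab]; exact hun),
            labGet_map_subst lab _ _ v hv0 (by rw [hlab]; exact hvn)]
        rw [subst_eq_iff _ _ _ _ (Ne.symm hlij)]
        rw [← hker u v hu0 hun hv0 hvn, ← hker u i hu0 hun hi0 hi1,
            ← hker u j hu0 hun hj0 hj1, ← hker v i hv0 hvn hi0 hi1,
            ← hker v j hv0 hvn hj0 hj1]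
        tauto
    · rw [if_neg hconn, if_neg (by rw [← connAB]; exact hconn)]
      exact ih hjs' uf lab hufd hlen hlab hker

theorem outer_loop (rects : List (Int × Int × Int × Int)) :
    ∀ (is : List Int), (∀ i ∈ is, 0 ≤ i ∧ i < (rects.length : Int)) →
    ∀ (uf : List Int × List Int) (lab : List Int),
      (∃ d, UFd rects.length uf.1 d) → uf.1.length = rects.length →
      lab.length = rects.length → Ker rects.length uf.1 lab →
      (∃ d', UFd rects.length
        ((is.foldl (fun (uf : List Int × List Int) i =>
          (PySem.List.pyRange (i+1) (PySem.List.len rects) 1).foldl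
            (fun (uf : List Int × List Int) j =>
              if pvConnectedA (PySem.List.pyGetD rects i (0,0,0,0))
                              (PySem.List.pyGetD rects j (0,0,0,0))
              then ufUnion rects.length uf.1 uf.2 i j else uf) uf) uf)).1 d') ∧
      ((is.foldl (fun (uf : List Int × List Int) i =>
          (PySem.List.pyRange (i+1) (PySem.List.len rects) 1).foldl
            (fun (uf : List Int × List Int) j =>
              if pvConnectedA (PySem.List.pyGetD rects i (0,0,0,0))
                              (PySem.List.pyGetD rects j (0,0,0,0))
              then ufUnion rects.length uf.1 uf.2 i j else uf) uf) uf)).1.length = rects.length ∧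
      (is.foldl (fun (lab : List Int) i =>
          (PySem.List.pyRange (i+1) (PySem.List.len rects) 1).foldl
            (fun (lab : List Int) j =>
              if pvConnectedB (PySem.List.pyGetD rects i (0,0,0,0))
                              (PySem.List.pyGetD rects j (0,0,0,0))
              then
                if PySem.List.pyGetD lab i 0 ≠ PySem.List.pyGetD lab j 0 then
                  lab.map (fun l =>
                    if l = PySem.List.pyGetD lab j 0 then PySem.List.pyGetD lab i 0 else l)
                else lab
              else lab) lab) lab).length = rects.length ∧
      Ker rects.length
        ((is.foldl (fun (uf : List Int × List Int) i =>
          (PySem.List.pyRange (i+1) (PySem.List.len rects) 1).foldl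
            (fun (uf : List Int × List Int) j =>
              if pvConnectedA (PySem.List.pyGetD rects i (0,0,0,0))
                              (PySem.List.pyGetD rects j (0,0,0,0))
              then ufUnion rects.length uf.1 uf.2 i j else uf) uf) uf)).1
        (is.foldl (fun (lab : List Int) i =>
          (PySem.List.pyRange (i+1) (PySem.List.len rects) 1).foldl
            (fun (lab : List Int) j =>
              if pvConnectedB (PySem.List.pyGetD rects i (0,0,0,0))
                              (PySem.List.pyGetD rects j (0,0,0,0))
              then
                if PySem.List.pyGetD lab i 0 ≠ PySem.List.pyGetD lab j 0 then
                  lab.map (fun l =>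
                    if l = PySem.List.pyGetD lab j 0 then PySem.List.pyGetD lab i 0 else l)
                else lab
              else lab) lab) lab) := by
  intro is
  induction is with
  | nil => intro _ uf lab hufd hlen hlab hker; exact ⟨hufd, hlen, hlab, hker⟩
  | cons i is ih =>
    intro his uf lab hufd hlen hlab hker
    obtain ⟨hi0, hi1⟩ := his i (by simp)
    have his' : ∀ i' ∈ is, 0 ≤ i' ∧ i' < (rects.length : Int) :=
      fun i' hi' => his i' (by simp [hi'])
    simp only [List.foldl_cons]
    have hjs : ∀ j ∈ PySem.List.pyRange (i+1) (PySem.List.len rects) 1,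
        0 ≤ j ∧ j < (rects.length : Int) := by
      intro j hj
      obtain ⟨h1, h2⟩ := PySem.List.mem_pyRange_one.mp hj
      rw [PySem.List.len_eq] at h2
      exact ⟨by omega, h2⟩
    obtain ⟨hufd', hlen', hlab', hker'⟩ :=
      inner_loop rects i hi0 hi1 (PySem.List.pyRange (i+1) (PySem.List.len rects) 1)
        hjs uf lab hufd hlen hlab hker
    exact ih his' _ _ hufd' hlen' hlab' hker'

theorem roots_fold (n : Nat) :
    ∀ (is : List Int), (∀ i ∈ is, 0 ≤ i ∧ i < (n:Int)) →
    ∀ (p : List Int) (d : Int → Nat) (s : PySem.Set Int), UFd n p d → p.length = n →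
      (is.foldl (fun (acc : List Int × PySem.Set Int) i =>
          let f := ufFind n acc.1 i
          (f.1, PySem.Set.add acc.2 f.2)) (p, s)).2
        = is.foldl (fun s i => PySem.Set.add s (chainRoot n p i)) s := by
  intro is
  induction is with
  | nil => intro _ p d s _ _; rfl
  | cons i is ih =>
    intro his p d s hufd hlen
    obtain ⟨hi0, hi1⟩ := his i (by simp)
    have his' : ∀ i' ∈ is, 0 ≤ i' ∧ i' < (n:Int) := fun i' hi' => his i' (by simp [hi'])
    obtain ⟨fr, fc⟩ :=
      find_spec n p d hufd hlen n i hi0 hi1 (ufd_dlt n p d hufd i hi0 hi1)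
    simp only [List.foldl_cons]
    rw [ih his' (ufFind n p i).1 d _ (compressed_ufd n p _ d hufd fc) (by rw [fc.1, hlen])]
    rw [fr]
    apply PySem.List.foldl_congr_mem
    intro acc x hx
    obtain ⟨hx0, hx1⟩ := his' x hx
    rw [compressed_chain n p _ d hufd fc x hx0 hx1]

theorem set_len_eq (f g : Int → Int) :
    ∀ (xs : List Int) (s t : PySem.Set Int),
      (∀ x ∈ xs, ∀ y ∈ xs, (f x = f y ↔ g x = g y)) →
      (∀ x ∈ xs, (f x ∈ s ↔ g x ∈ t)) → s.length = t.length →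
      (xs.foldl (fun s x => PySem.Set.add s (f x)) s).length =
      (xs.foldl (fun t x => PySem.Set.add t (g x)) t).length := by
  intro xs
  induction xs with
  | nil => intro s t _ _ h; exact h
  | cons x xs ih =>
    intro s t hker hmem hlen
    simp only [List.foldl_cons]
    apply ih
    · intro a ha b hb; exact hker a (by simp [ha]) b (by simp [hb])
    · intro a ha
      rw [PySem.Set.mem_add, PySem.Set.mem_add]
      constructor
      · rintro (hh | hh)
        · exact Or.inl ((hmem a (by simp [ha])).mp hh)
        · exact Or.inr ((hker a (by simp [ha]) x (by simp)).mp hh)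
      · rintro (hh | hh)
        · exact Or.inl ((hmem a (by simp [ha])).mpr hh)
        · exact Or.inr ((hker a (by simp [ha]) x (by simp)).mpr hh)
    · rw [PySem.Set.add_eq_ite, PySem.Set.add_eq_ite]
      by_cases hx : f x ∈ s
      · rw [if_pos hx, if_pos ((hmem x (by simp)).mp hx)]
        exact hlen
      · rw [if_neg hx, if_neg (fun hh => hx ((hmem x (by simp)).mpr hh))]
        simp [hlen]

theorem ufGet_init (rects : List (Int × Int × Int × Int)) (u : Int) (hu0 : 0 ≤ u)
    (hun : u < (rects.length : Int)) :
    ufGet (PySem.List.pyRange 0 (PySem.List.len rects) 1) u = u := by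
  rw [PySem.List.len_eq, ufGet,
    PySem.List.pyGetD_eq_getElem _ _ hu0
      (by rw [PySem.List.length_pyRange_one]; omega),
    PySem.List.getElem_pyRange_one]
  omega

theorem getD_init (rects : List (Int × Int × Int × Int)) (u : Int) (hu0 : 0 ≤ u)
    (hun : u < (rects.length : Int)) :
    PySem.List.pyGetD (PySem.List.pyRange 0 (PySem.List.len rects) 1) u 0 = u := by
  rw [PySem.List.len_eq,
    PySem.List.pyGetD_eq_getElem _ _ hu0
      (by rw [PySem.List.length_pyRange_one]; omega),
    PySem.List.getElem_pyRange_one]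
  omega

theorem root_init (rects : List (Int × Int × Int × Int)) (f : Nat) (u : Int) (hu0 : 0 ≤ u)
    (hun : u < (rects.length : Int)) :
    chainRoot f (PySem.List.pyRange 0 (PySem.List.len rects) 1) u = u :=
  chainRoot_of_root _ _ _ (ufGet_init rects u hu0 hun)

theorem len_init (rects : List (Int × Int × Int × Int)) :
    (PySem.List.pyRange 0 (PySem.List.len rects) 1).length = rects.length := by
  rw [PySem.List.len_eq, PySem.List.length_pyRange_one]
  omega

theorem init_ufd (rects : List (Int × Int × Int × Int)) :
    UFd rects.length (PySem.List.pyRange 0 (PySem.List.len rects) 1) (fun _ => 0) := by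
  constructor
  · intro u hu0 hun
    rw [ufGet_init rects u hu0 hun]
    exact ⟨hu0, hun, fun h => absurd rfl h⟩
  · intro u hu0 hun
    apply Nat.pos_of_ne_zero
    intro h0
    have := (List.countP_eq_zero.mp h0) u (PySem.List.mem_pyRange_one.mpr ⟨hu0, hun⟩)
    simp at this

theorem init_ker (rects : List (Int × Int × Int × Int)) :
    Ker rects.length (PySem.List.pyRange 0 (PySem.List.len rects) 1)
      (PySem.List.pyRange 0 (PySem.List.len rects) 1) := by
  intro u v hu0 hun hv0 hvn
  rw [root_init rects _ u hu0 hun, root_init rects _ v hv0 hvn,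
    getD_init rects u hu0 hun, getD_init rects v hv0 hvn]

theorem any_origin (rects : List (Int × Int × Int × Int)) :
    ((PySem.List.pyRange 0 (PySem.List.len rects) 1).any
      (fun i => pvOriginA (PySem.List.pyGetD rects i (0,0,0,0)))) = rects.any pvOriginB := by
  conv_rhs => rw [← PySem.List.map_pyGetD_pyRange_zero rects (0,0,0,0)]
  rw [List.any_map]
  rfl

theorem counts_eq (n : Nat) (R : List Int) (hRfull : R = PySem.List.pyRange 0 (n:Int) 1)
    (pf lab : List Int) (hlab : lab.length = n) (hker : Ker n pf lab) :
    (R.foldl (fun s i => PySem.Set.add s (chainRoot n pf i)) PySem.Set.empty).length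
      = (PySem.Set.ofList lab).length := by
  have hR : ∀ i ∈ R, 0 ≤ i ∧ i < (n:Int) := by
    intro i hi
    rw [hRfull] at hi
    exact PySem.List.mem_pyRange_one.mp hi
  have e1 : PySem.Set.ofList lab
      = R.foldl (fun t j => PySem.Set.add t (PySem.List.pyGetD lab j 0)) PySem.Set.empty := by
    conv_lhs => rw [← PySem.List.map_pyGetD_pyRange_zero lab 0]
    have e2 : PySem.List.pyRange 0 (PySem.List.len lab) 1 = R := by
      rw [PySem.List.len_eq, hlab, hRfull]
    rw [e2, PySem.Set.ofList_eq_foldl, List.foldl_map]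
    rfl
  rw [e1]
  apply set_len_eq
  · intro x hx y hy
    obtain ⟨hx0, hx1⟩ := hR x hx
    obtain ⟨hy0, hy1⟩ := hR y hy
    exact hker x y hx0 hx1 hy0 hy1
  · intro x _
    simp [PySem.Set.empty]
  · rfl

theorem main_eq (rects : List (Int × Int × Int × Int)) :
    find_min_pu_commands rects = find_min_pu_commands_alt rects := by
  have hbound : ∀ i ∈ PySem.List.pyRange 0 (PySem.List.len rects) 1,
      0 ≤ i ∧ i < (rects.length : Int) := by
    intro i hi
    obtain ⟨h1, h2⟩ := PySem.List.mem_pyRange_one.mp hi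
    rw [PySem.List.len_eq] at h2
    exact ⟨h1, h2⟩
  obtain ⟨⟨dF, hufdF⟩, hlenF, hlabF, hkerF⟩ :=
    outer_loop rects (PySem.List.pyRange 0 (PySem.List.len rects) 1) hbound
      (PySem.List.pyRange 0 (PySem.List.len rects) 1, List.replicate rects.length 1)
      (PySem.List.pyRange 0 (PySem.List.len rects) 1)
      ⟨fun _ => 0, init_ufd rects⟩ (len_init rects) (len_init rects) (init_ker rects)
  simp only [find_min_pu_commands, find_min_pu_commands_alt]
  rw [PySem.List.foldl_prod_mk
    (f := fun (uf : List Int × List Int) i =>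
      (PySem.List.pyRange (i+1) (PySem.List.len rects) 1).foldl
        (fun (uf : List Int × List Int) j =>
          if pvConnectedA (PySem.List.pyGetD rects i (0,0,0,0))
                          (PySem.List.pyGetD rects j (0,0,0,0))
          then ufUnion rects.length uf.1 uf.2 i j else uf) uf)
    (g := fun (b : Bool) i =>
      if pvOriginA (PySem.List.pyGetD rects i (0,0,0,0)) then true else b)]
  rw [PySem.List.foldl_if_true_eq]
  rw [roots_fold rects.length (PySem.List.pyRange 0 (PySem.List.len rects) 1) hbound
    _ dF PySem.Set.empty hufdF hlenF]
  dsimp only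
  rw [Bool.false_or, any_origin]
  have hkey := counts_eq rects.length (PySem.List.pyRange 0 (PySem.List.len rects) 1)
    (by rw [PySem.List.len_eq]) _ _ hlabF hkerF
  simp only [PySem.List.len_eq] at hkey ⊢
  rw [hkey]

-- ===== VERDICT (by name: the statement is the Claim_ definition above) =====
theorem find_min_pu_commands_spec : Claim_equal_find_min_pu_commands := by
  intro rects _
  exact main_eq rects
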